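-- pv_equiv track=rewrite | github.com/TaniaBladier/Transformer-based-TWG-parsing | backtransformation.py | find_spans_in_list
-- ===== SOURCE A (Python) =====
-- from typing import Sequence
--
-- def flatten(input):
--     return [i for el in input
--             for i in (flatten(el)
--                       if (isinstance(el, Sequence) and not isinstance(el, str))
--                       else [el])
--             ]
--
-- def span_representation(lst):
--     sp_repr = '_'.join(str(x) for x in flatten(lst))
--     return sp_repr
--
-- def find_spans_in_list(lst):
--     cluster_points = []
--     chunks = []
--
--     n = 0
--     while n < len(lst) - 1:
--         if lst[n + 1] - lst[n] != 1:
--             cluster_points.append(n + 1)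
--         n += 1
--
--     c = 0
--     l = len(lst)
--     if len(cluster_points) > 0:
--         for x in cluster_points:
--             chunk = lst[c:x]
--             chunks.append(chunk)
--             c = x
--         last_chunk = lst[cluster_points[-1]:l]
--         chunks.append(last_chunk)
--     if len(cluster_points) == 0:
--         chunks.append(lst[0:])
--
--     chunks_new = [span_representation(x) for x in chunks]
--     return chunks_new
-- ===== SOURCE B (Python) =====
-- def find_spans_in_list(lst):
--     if not lst:
--         return ['']
--     chunks = []
--     current = [lst[0]]
--     for prev, cur in zip(lst, lst[1:]):
--         if cur - prev == 1:
--             current.append(cur)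
--         else:
--             chunks.append(current)
--             current = [cur]
--     chunks.append(current)
--     return ['_'.join(str(x) for x in c) for c in chunks]
-- ===== Notes on version B (the rewrite author's own statement) =====
-- stated objective: simpler
-- what changed: one streaming pass that grows a current run and flushes it at each non-+1 step replaces A's two-phase scheme of collecting break indices and then slicing the list at them (constant-factor win: no index list and no slicing)
import Mathlib
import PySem

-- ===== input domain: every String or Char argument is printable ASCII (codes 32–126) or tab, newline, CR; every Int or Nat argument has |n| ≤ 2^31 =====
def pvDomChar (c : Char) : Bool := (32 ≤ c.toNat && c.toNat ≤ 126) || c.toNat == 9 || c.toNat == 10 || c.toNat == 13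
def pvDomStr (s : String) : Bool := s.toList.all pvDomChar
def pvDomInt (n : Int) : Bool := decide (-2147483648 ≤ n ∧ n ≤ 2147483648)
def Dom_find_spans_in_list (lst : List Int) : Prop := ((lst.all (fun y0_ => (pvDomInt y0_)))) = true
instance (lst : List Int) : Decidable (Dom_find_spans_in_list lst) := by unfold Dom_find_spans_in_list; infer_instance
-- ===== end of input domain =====

-- B replaces A's two-phase break-index-then-slice scheme by a single streaming
-- grouping pass (objective: simpler); return values proved equal on all inputs.

-- ===== PORT A =====
-- span_representation: '_'.join(str(x) for x in flatten(lst)); on a flat list of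
-- ints, flatten is the identity, so this is '_'.join over the elements.
def pvSpanRepr (l : List Int) : String :=
  PySem.Str.join "_" (l.map PySem.Int.toStr)

-- the while-loop collecting cluster_points (indices n+1 with lst[n+1]-lst[n] != 1)
def pvClusterPoints (lst : List Int) : List Int :=
  (PySem.List.pyRange 0 ((lst.length : Int) - 1)).foldl
    (fun acc n =>
      if PySem.List.pyGetD lst (n + 1) 0 - PySem.List.pyGetD lst n 0 ≠ 1
      then acc ++ [n + 1] else acc) []

def find_spans_in_list (lst : List Int) : List String :=
  let cluster_points := pvClusterPoints lst
  let chunks : List (List Int) :=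
    if cluster_points.length > 0 then
      let st := cluster_points.foldl
        (fun (st : Int × List (List Int)) x =>
          (x, st.2 ++ [PySem.List.slice lst (some st.1) (some x)])) (0, [])
      st.2 ++ [PySem.List.slice lst
        (some (PySem.List.pyGetD cluster_points (-1) 0)) (some (lst.length : Int))]
    else []
  let chunks2 :=
    if cluster_points.length = 0
    then chunks ++ [PySem.List.slice lst (some (0 : Int)) none]
    else chunks
  chunks2.map pvSpanRepr

-- ===== PORT B =====
def find_spans_in_list_alt (lst : List Int) : List String :=
  match lst with
  | [] => [""]
  | a :: rest =>
    let st := ((a :: rest).zip rest).foldl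
      (fun (st : List (List Int) × List Int) pc =>
        if pc.2 - pc.1 = 1 then (st.1, st.2 ++ [pc.2])
        else (st.1 ++ [st.2], [pc.2])) ([], [a])
    (st.1 ++ [st.2]).map pvSpanRepr

-- ===== PRECONDITION & SPEC =====
def Spec_find_spans_in_list (lst : List Int) (out : List String) : Prop := out = find_spans_in_list_alt lst
instance (lst : List Int) (out : List String) : Decidable (Spec_find_spans_in_list lst out) := by unfold Spec_find_spans_in_list; infer_instance

-- ===== CLAIM (what is proved, stated in full; the proofs are below) =====
def Claim_equal_find_spans_in_list : Prop := ∀ (lst : List Int), Dom_find_spans_in_list lst → Spec_find_spans_in_list lst (find_spans_in_list lst)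

-- ===== LEMMAS AND PROOFS =====

-- prepend a prefix onto the first chunk (creating it if there is none)
def pvPrependFirst (cur : List Int) : List (List Int) → List (List Int)
  | [] => [cur]
  | g :: gs => (cur ++ g) :: gs

-- the canonical difference-1 runs of a :: t
def pvRuns : Int → List Int → List (List Int)
  | a, [] => [[a]]
  | a, b :: t =>
    if b - a = 1 then pvPrependFirst [a] (pvRuns b t)
    else [a] :: pvRuns b t

-- break positions (1-based) of a :: t
def pvBps : Int → List Int → List Nat
  | _, [] => []
  | a, b :: t =>
    if b - a = 1 then (pvBps b t).map (· + 1)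
    else 1 :: (pvBps b t).map (· + 1)

-- cutting lst at positions (Nat level)
def pvCuts (lst : List Int) : Nat → List Nat → List (List Int)
  | c, [] => [lst.drop c]
  | c, x :: xs => (lst.drop c).take (x - c) :: pvCuts lst x xs

-- slice sequence produced by A's for-loop (Int level)
def pvSliceSeq (lst : List Int) : Int → List Int → List (List Int)
  | _, [] => []
  | c, x :: xs => PySem.List.slice lst (some c) (some x) :: pvSliceSeq lst x xs

theorem pvRuns_ne_nil (a : Int) (t : List Int) : pvRuns a t ≠ [] := by
  cases t with
  | nil => simp [pvRuns]
  | cons b t =>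
    simp only [pvRuns]
    split
    · cases h : pvRuns b t <;> simp [pvPrependFirst]
    · simp

theorem pvPrependFirst_nil (r : List (List Int)) (h : r ≠ []) :
    pvPrependFirst [] r = r := by
  cases r with
  | nil => exact absurd rfl h
  | cons g gs => simp [pvPrependFirst]

theorem pvPrependFirst_comp (cur : List Int) (a : Int) (r : List (List Int)) :
    pvPrependFirst cur (pvPrependFirst [a] r) = pvPrependFirst (cur ++ [a]) r := by
  cases r <;> simp [pvPrependFirst]

theorem pvCuts_shift (lst : List Int) (a : Int) :
    ∀ (ps : List Nat) (c : Nat),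
      pvCuts (a :: lst) (c + 1) (ps.map (· + 1)) = pvCuts lst c ps := by
  intro ps
  induction ps with
  | nil => intro c; simp [pvCuts]
  | cons x xs ih =>
    intro c
    simp only [List.map_cons, pvCuts, List.drop_succ_cons, ih]
    congr 1
    congr 1
    omega

theorem pvCuts_cons_zero (lst : List Int) (a : Int) (ps : List Nat) :
    pvCuts (a :: lst) 0 (ps.map (· + 1)) = pvPrependFirst [a] (pvCuts lst 0 ps) := by
  cases ps with
  | nil => simp [pvCuts, pvPrependFirst]
  | cons x xs =>
    simp only [List.map_cons, pvCuts, List.drop_zero, pvPrependFirst]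
    rw [pvCuts_shift]
    simp [List.take_succ_cons]

theorem pvCuts_bps : ∀ (rest : List Int) (a : Int),
    pvCuts (a :: rest) 0 (pvBps a rest) = pvRuns a rest := by
  intro rest
  induction rest with
  | nil => intro a; simp [pvBps, pvCuts, pvRuns]
  | cons b t ih =>
    intro a
    simp only [pvBps, pvRuns]
    split
    · rw [pvCuts_cons_zero, ih]
    · simp only [pvCuts, List.drop_zero, List.take_succ_cons, List.take_zero]
      rw [show (1 : Nat) = 0 + 1 from rfl, pvCuts_shift, ih]

-- characterising A's cluster_points
theorem pvFoldl_brk (lst : List Int) :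
    ∀ (l : List Int) (acc : List Int),
      l.foldl (fun acc n =>
        if PySem.List.pyGetD lst (n + 1) 0 - PySem.List.pyGetD lst n 0 ≠ 1
        then acc ++ [n + 1] else acc) acc
      = acc ++ (l.filter (fun n =>
          decide (PySem.List.pyGetD lst (n + 1) 0 - PySem.List.pyGetD lst n 0 ≠ 1))).map (· + 1) := by
  intro l
  induction l with
  | nil => intro acc; simp
  | cons x xs ih =>
    intro acc
    rw [List.foldl_cons]
    by_cases h : PySem.List.pyGetD lst (x + 1) 0 - PySem.List.pyGetD lst x 0 ≠ 1
    · rw [if_pos h, ih, List.filter_cons_of_pos (by simpa using h)]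
      simp [List.append_assoc]
    · rw [if_neg h, ih, List.filter_cons_of_neg (by simpa using h)]

theorem pvBrk_nat : ∀ (rest : List Int) (a : Int),
    ((List.range rest.length).filter (fun n =>
        decide ((a :: rest).getD (n + 1) 0 - (a :: rest).getD n 0 ≠ 1))).map (· + 1)
      = pvBps a rest := by
  intro rest
  induction rest with
  | nil => intro a; simp [pvBps]
  | cons b t ih =>
    intro a
    have key : ((fun n => decide ((a :: b :: t).getD (n + 1) 0 - (a :: b :: t).getD n 0 ≠ 1)) ∘ Nat.succ)
             = (fun n => decide ((b :: t).getD (n + 1) 0 - (b :: t).getD n 0 ≠ 1)) := rfl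
    rw [List.length_cons, List.range_succ_eq_map, List.filter_cons, List.filter_map, key]
    by_cases h : b - a = 1
    · simp only [pvBps, ← ih b, List.map_map, List.getD_cons_succ, List.getD_cons_zero, h,
        ne_eq, not_true_eq_false, decide_false, Bool.false_eq_true, if_false, if_true]
    · simp only [pvBps, ← ih b, List.map_map, List.getD_cons_succ, List.getD_cons_zero,
        ne_eq, h, not_false_eq_true, decide_true, if_true, if_false, List.map_cons, zero_add]

theorem pvClusterPoints_cons (a : Int) (rest : List Int) :
    pvClusterPoints (a :: rest) = (pvBps a rest).map (fun n => ((n : Nat) : Int)) := by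
  unfold pvClusterPoints
  have hlen : ((a :: rest).length : Int) - 1 = (rest.length : Nat) := by
    simp
  rw [hlen, PySem.List.pyRange_zero_natCast, pvFoldl_brk]
  rw [List.filter_map, List.map_map]
  simp only [List.nil_append]
  have hfil : ((fun n : Int =>
      decide (PySem.List.pyGetD (a :: rest) (n + 1) 0 - PySem.List.pyGetD (a :: rest) n 0 ≠ 1))
        ∘ fun k : Nat => (k : Int))
      = fun n : Nat => decide ((a :: rest).getD (n + 1) 0 - (a :: rest).getD n 0 ≠ 1) := by
    funext n
    simp only [Function.comp]
    have h1 : ((n : Int) + 1) = ((n + 1 : Nat) : Int) := by push_cast; ring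
    rw [h1, PySem.List.pyGetD_natCast, PySem.List.pyGetD_natCast]
  rw [hfil, ← pvBrk_nat rest a, List.map_map]
  congr 1

-- A's for-loop over cluster_points
theorem pvFoldA (lst : List Int) :
    ∀ (ps : List Int) (c : Int) (chs : List (List Int)),
      ps.foldl (fun (st : Int × List (List Int)) x =>
          (x, st.2 ++ [PySem.List.slice lst (some st.1) (some x)])) (c, chs)
        = (ps.getLastD c, chs ++ pvSliceSeq lst c ps) := by
  intro ps
  induction ps with
  | nil => intro c chs; simp [pvSliceSeq]
  | cons x xs ih =>
    intro c chs
    simp only [List.foldl_cons, ih, pvSliceSeq, List.getLastD_cons, List.append_assoc,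
      List.singleton_append]

theorem pvSliceSeq_cuts (lst : List Int) :
    ∀ (ps : List Nat) (c : Nat),
      pvSliceSeq lst (c : Int) (ps.map (fun n => ((n : Nat) : Int)))
          ++ [PySem.List.slice lst
                (some ((ps.map (fun n => ((n : Nat) : Int))).getLastD (c : Int)))
                (some (lst.length : Int))]
        = pvCuts lst c ps := by
  intro ps
  induction ps with
  | nil =>
    intro c
    simp only [List.map_nil, pvSliceSeq, List.getLastD_nil, List.nil_append, pvCuts]
    rw [PySem.List.slice_natCast]
    congr 1
    apply List.take_of_length_le
    simp
  | cons x xs ih =>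
    intro c
    simp only [List.map_cons, pvSliceSeq, List.getLastD_cons, List.cons_append, pvCuts]
    rw [PySem.List.slice_natCast, ih]

-- B's loop
theorem pvFoldB : ∀ (t : List Int) (a : Int) (chs : List (List Int)) (cur : List Int),
    (let st := ((a :: t).zip t).foldl
        (fun (st : List (List Int) × List Int) pc =>
          if pc.2 - pc.1 = 1 then (st.1, st.2 ++ [pc.2])
          else (st.1 ++ [st.2], [pc.2])) (chs, cur ++ [a])
     st.1 ++ [st.2]) = chs ++ pvPrependFirst cur (pvRuns a t) := by
  intro t
  induction t with
  | nil =>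
    intro a chs cur
    simp [pvRuns, pvPrependFirst]
  | cons b t ih =>
    intro a chs cur
    have hz : ((a :: b :: t).zip (b :: t)) = (a, b) :: ((b :: t).zip t) := rfl
    simp only [hz, List.foldl_cons, pvRuns]
    by_cases h : b - a = 1
    · simp only [h, if_true]
      have := ih b chs (cur ++ [a])
      simp only [List.append_assoc, List.singleton_append] at this ⊢
      rw [this, pvPrependFirst_comp]
    · simp only [h, if_false]
      have := ih b (chs ++ [cur ++ [a]]) []
      simp only [List.nil_append] at this
      rw [this, pvPrependFirst_nil _ (pvRuns_ne_nil b t)]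
      simp [pvPrependFirst, List.append_assoc]

theorem pvA_runs (a : Int) (rest : List Int) :
    find_spans_in_list (a :: rest) = (pvRuns a rest).map pvSpanRepr := by
  unfold find_spans_in_list
  rw [pvClusterPoints_cons]
  cases hb : pvBps a rest with
  | nil =>
    simp only [List.map_nil, List.length_nil, gt_iff_lt, lt_self_iff_false, if_false,
      if_true, List.nil_append]
    rw [PySem.List.slice_zero_start, PySem.List.slice_none_none]
    have : pvCuts (a :: rest) 0 (pvBps a rest) = pvRuns a rest := pvCuts_bps rest a
    rw [hb] at this
    simp only [pvCuts, List.drop_zero] at this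
    rw [← this]
  | cons x xs =>
    simp only [List.map_cons, List.length_cons, gt_iff_lt, Nat.succ_ne_zero, if_false]
    simp only [Nat.zero_lt_succ, if_true]
    rw [pvFoldA]
    have hne : ((x : Int) :: xs.map (fun n => ((n : Nat) : Int))) ≠ [] := by simp
    rw [PySem.List.pyGetD_neg_one _ _ hne]
    simp only [List.nil_append]
    have hlast : ((x : Int) :: xs.map (fun n => ((n : Nat) : Int))).getLast hne
        = ((x : Int) :: xs.map (fun n => ((n : Nat) : Int))).getLastD ((0 : Nat) : Int) := by
      rw [List.getLastD_cons, List.getLast_eq_getLastD]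
    rw [hlast]
    have hmap : ((x : Int) :: xs.map (fun n => ((n : Nat) : Int)))
        = (x :: xs).map (fun n => ((n : Nat) : Int)) := by simp
    rw [hmap]
    have hseq := pvSliceSeq_cuts (a :: rest) (x :: xs) 0
    simp only [Nat.cast_zero, List.length_cons, List.map_cons] at hseq ⊢
    rw [hseq]
    have hc := pvCuts_bps rest a
    rw [hb] at hc
    rw [hc]

theorem pvB_runs (a : Int) (rest : List Int) :
    find_spans_in_list_alt (a :: rest) = (pvRuns a rest).map pvSpanRepr := by
  have h := pvFoldB rest a [] []
  simp only [List.nil_append] at h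
  simp only [find_spans_in_list_alt]
  rw [h, pvPrependFirst_nil _ (pvRuns_ne_nil a rest)]

-- ===== VERDICT (by name: the statement is the Claim_ definition above) =====
theorem find_spans_in_list_spec : Claim_equal_find_spans_in_list := by
  intro lst _
  unfold Spec_find_spans_in_list
  cases lst with
  | nil => decide
  | cons a rest => rw [pvA_runs, pvB_runs]
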